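-- pv_equiv track=rewrite | github.com/LyubimovaVeronika/TITANIC | main.py | get_embarked
-- ===== SOURCE A (Python) =====
-- def get_embarked(data):
--     # Функция возвращает сопоставление [типы портов] - [кол-во отправившихся из этих портов]
--     ports = []
--     counts = []
--     for port in data:
--         if ports.count(port) == 0:
--             ports.append(port)
--             counts.append(0)
--         else:
--             counts[ports.index(port)] += 1
--
--     return (ports,counts)
-- ===== SOURCE B (Python) =====
-- def get_embarked(data):
--     # One pass builds a full frequency table; ordered distinct ports come from
--     # dict.fromkeys; counts are read off the table (occurrences - 1).
--     d = list(data)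
--     freq = {}
--     for p in d:
--         freq[p] = freq.get(p, 0) + 1
--     ports = list(dict.fromkeys(d))
--     counts = [freq[p] - 1 for p in ports]
--     return (ports, counts)
-- ===== Notes on version B (the rewrite author's own statement) =====
-- stated objective: faster
-- what changed: Replaces A's per-element inner scans (list.count + list.index on the growing ports list) with a single dict frequency pass plus an ordered-dedup pass that reads counts off the table.
import Mathlib
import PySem

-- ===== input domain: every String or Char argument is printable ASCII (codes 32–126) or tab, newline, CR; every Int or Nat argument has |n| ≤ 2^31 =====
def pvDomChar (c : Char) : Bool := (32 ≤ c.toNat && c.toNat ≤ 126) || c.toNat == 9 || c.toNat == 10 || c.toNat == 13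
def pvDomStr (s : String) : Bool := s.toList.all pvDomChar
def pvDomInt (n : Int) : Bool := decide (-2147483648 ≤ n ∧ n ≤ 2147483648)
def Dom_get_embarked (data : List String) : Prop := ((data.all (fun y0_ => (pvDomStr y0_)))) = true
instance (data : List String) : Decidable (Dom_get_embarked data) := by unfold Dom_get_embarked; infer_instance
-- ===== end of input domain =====

-- B replaces A's per-element scans of the growing ports list with one frequency-table
-- pass plus an ordered dedup (objective: faster).

-- ===== PORT A =====
-- loop body of A: one iteration of 'for port in data'
def pvStepA (s : List String × List Int) (port : String) : List String × List Int :=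
  if PySem.List.count s.1 port == 0 then
    (s.1 ++ [port], s.2 ++ [0])
  else
    -- ports.index(port): the element is present here (count ≠ 0), so .getD 0 is exact
    let i : Nat := (PySem.List.index? s.1 port).getD 0
    (s.1, PySem.List.pySetD s.2 (i : Int) (PySem.List.pyGetD s.2 (i : Int) 0 + 1))

def get_embarked (data : List String) : List String × List Int :=
  data.foldl pvStepA ([], [])

-- ===== PORT B =====
def get_embarked_alt (data : List String) : List String × List Int :=
  let d := data
  let freq := d.foldl (fun (f : PySem.Dict String Int) p => f.insert p (f.getD p 0 + 1)) PySem.Dict.empty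
  let ports := PySem.List.dedup d
  -- freq[p]: every p ∈ ports occurs in d, so the key is present and .getD 0 is exact
  (ports, ports.map (fun p => freq.getD p 0 - 1))

-- ===== PRECONDITION & SPEC =====
def Spec_get_embarked (data : List String) (out : List String × List Int) : Prop := out = get_embarked_alt data
instance (data : List String) (out : List String × List Int) : Decidable (Spec_get_embarked data out) := by unfold Spec_get_embarked; infer_instance

-- ===== CLAIM (what is proved, stated in full; the proofs are below) =====
def Claim_equal_get_embarked : Prop := ∀ (data : List String), Dom_get_embarked data → Spec_get_embarked data (get_embarked data)

-- ===== LEMMAS AND PROOFS =====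

theorem pvDedup_append_singleton (l : List String) (x : String) :
    PySem.List.dedup (l ++ [x]) = PySem.Set.add (PySem.List.dedup l) x := by
  simp [PySem.List.dedup_eq_ofList, PySem.Set.ofList_eq_foldl, List.foldl_append]

-- Invariant of A's loop: after processing l the state is
-- (ordered distinct elements of l, their multiplicities in l minus one).
theorem pvFoldA_eq (l : List String) :
    l.foldl pvStepA ([], []) =
      (PySem.List.dedup l,
       (PySem.List.dedup l).map (fun p => (l.count p : Int) - 1)) := by
  induction l using List.reverseRecOn with
  | nil => rfl
  | append_singleton l x ih =>
    rw [List.foldl_append, ih]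
    simp only [List.foldl_cons, List.foldl_nil]
    rw [pvDedup_append_singleton]
    set L := PySem.List.dedup l with hL
    have nd : L.Nodup := PySem.List.nodup_dedup l
    by_cases hx : x ∈ l
    · -- x already seen: count ≠ 0 branch, dedup unchanged, one count bumped
      have hxL : x ∈ L := (PySem.List.mem_dedup l x).mpr hx
      have hpos : 0 < L.count x := List.count_pos_iff.mpr hxL
      have hc : (PySem.List.count L x == 0) = false := by
        rw [PySem.List.count_eq]; simp; omega
      have hadd : PySem.Set.add L x = L := by
        simp [PySem.Set.add, PySem.Set.contains, hxL]
      obtain ⟨k, hk⟩ : ∃ k, PySem.List.index? L x = some k :=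
        Option.isSome_iff_exists.mp ((PySem.List.index?_isSome_iff L x).mpr hxL)
      obtain ⟨hklen, hLk, _⟩ := PySem.List.getElem_of_index?_eq_some hk
      unfold pvStepA
      simp only [hc, Bool.false_eq_true, if_false, hk, Option.getD_some, hadd]
      have hget : PySem.List.pyGetD (L.map (fun p => (l.count p : Int) - 1)) (k : Int) 0
          = (l.count x : Int) - 1 := by
        rw [PySem.List.pyGetD_natCast]
        simp [List.getD_eq_getElem?_getD, hklen, hLk]
      rw [hget, PySem.List.pySetD_natCast]
      refine Prod.ext rfl ?_
      apply List.ext_getElem (by simp)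
      intro j hj1 hj2
      simp only
      have hjL : j < L.length := by simpa using hj2
      rw [List.getElem_set]
      split_ifs with hkj
      · subst hkj
        rw [List.getElem_map, hLk]
        have hca : (l ++ [x]).count x = l.count x + 1 := by
          simp [List.count_append]
        rw [hca]
        push_cast
        ring
      · have hne : L[j] ≠ x := by
          intro h
          exact hkj (nd.getElem_inj_iff.mp (by rw [hLk, h]))
        rw [List.getElem_map]
        have hca : (l ++ [x]).count L[j] = l.count L[j] := by
          simp [List.count_append, Ne.symm hne]
        rw [List.getElem_map, hca]
    · -- first occurrence: count = 0 branch, x appended with count 0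
      have hxL : x ∉ L := fun h => hx ((PySem.List.mem_dedup l x).mp h)
      have hc : (PySem.List.count L x == 0) = true := by
        rw [PySem.List.count_eq]
        simp [List.count_eq_zero.mpr hxL]
      have hadd : PySem.Set.add L x = L ++ [x] := by
        simp [PySem.Set.add, PySem.Set.contains, hxL]
      unfold pvStepA
      simp only [hc, if_true, hadd]
      refine Prod.ext rfl ?_
      simp only [List.map_append, List.map_singleton]
      congr 1
      · apply List.map_congr_left
        intro p hp
        have hpx : p ≠ x := fun h => hx (h ▸ ((PySem.List.mem_dedup l p).mp hp))
        have hca : (l ++ [x]).count p = l.count p := by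
          simp [List.count_append, Ne.symm hpx]
        rw [hca]
      · have hca : (l ++ [x]).count x = 1 := by
          simp [List.count_append, List.count_eq_zero.mpr hx]
        rw [hca]
        norm_num

theorem get_embarked_alt_eq (data : List String) :
    get_embarked_alt data =
      (PySem.List.dedup data,
       (PySem.List.dedup data).map (fun p => (data.count p : Int) - 1)) := by
  unfold get_embarked_alt
  simp only [PySem.Dict.foldl_insert_getD_add_one_eq_counter, PySem.Dict.getD_counter]

-- ===== VERDICT (by name: the statement is the Claim_ definition above) =====
theorem get_embarked_spec : Claim_equal_get_embarked := by
  intro data _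
  unfold Spec_get_embarked get_embarked
  rw [pvFoldA_eq, get_embarked_alt_eq]
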